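/- GENERATED by c/gen_decode.py: decode facts of the image, one per distinct instruction byte string. -/
import UserX.DecodeImage

#decode_all Toyh.Dec
  "4883ff40"  -- cmp rdi,0x40
  "b840000000"  -- mov eax,0x40
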